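-- pv_equiv track=rewrite | github.com/itsnothuy/Doorbell-System | src/doorbell_security.py | _determine_response
-- ===== SOURCE A (Python) =====
-- def _determine_response(face_results):
--     """Determine system response based on face analysis results"""
--     has_blacklisted = any(r['status'] == 'blacklisted' for r in face_results)
--     has_unknown = any(r['status'] == 'unknown' for r in face_results)
--     has_known = any(r['status'] == 'known' for r in face_results)
--
--     if has_blacklisted:
--         return 'blacklist_alert'
--     elif has_unknown:
--         return 'unknown_alert'
--     elif has_known:
--         return 'known_person'
--     else:
--         return 'no_faces'
-- ===== SOURCE B (Python) =====
-- def _determine_response(face_results):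
--     """Determine system response based on face analysis results"""
--     has_unknown = False
--     has_known = False
--     for r in face_results:
--         s = r['status']
--         if s == 'blacklisted':
--             return 'blacklist_alert'
--         if s == 'unknown':
--             has_unknown = True
--         elif s == 'known':
--             has_known = True
--     if has_unknown:
--         return 'unknown_alert'
--     if has_known:
--         return 'known_person'
--     return 'no_faces'
-- ===== Notes on version B (the rewrite author's own statement) =====
-- stated objective: simpler
-- what changed: Replaces the three separate any() scans over face_results with one single pass that returns 'blacklist_alert' immediately at the first blacklisted record and otherwise accumulates has_unknown/has_known flags.
import Mathlib
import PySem

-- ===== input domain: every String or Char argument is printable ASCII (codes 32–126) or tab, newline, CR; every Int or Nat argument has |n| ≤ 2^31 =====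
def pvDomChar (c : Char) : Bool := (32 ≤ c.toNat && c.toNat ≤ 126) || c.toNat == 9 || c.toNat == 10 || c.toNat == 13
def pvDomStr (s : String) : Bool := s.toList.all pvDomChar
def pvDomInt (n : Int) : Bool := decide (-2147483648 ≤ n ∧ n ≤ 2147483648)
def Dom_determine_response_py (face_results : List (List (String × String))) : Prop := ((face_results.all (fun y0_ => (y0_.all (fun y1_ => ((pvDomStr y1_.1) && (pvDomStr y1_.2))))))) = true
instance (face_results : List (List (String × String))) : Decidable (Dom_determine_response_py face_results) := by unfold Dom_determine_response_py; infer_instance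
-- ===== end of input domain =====

-- ===== PORT A =====
-- One honest line: B replaces A's three any() scans with a single pass (early return on
-- 'blacklisted', flags for the rest); equivalence is on inputs whose records all carry a
-- 'status' key (Python A raises KeyError otherwise).

-- r['status'] as first-match lookup (none = KeyError, excluded by Pre_)
def pvStatus (r : List (String × String)) : Option String :=
  (PySem.Dict.mk r).get? "status"

def determine_response_py (face_results : List (List (String × String))) : String :=
  let has_blacklisted := face_results.any (fun r => pvStatus r == some "blacklisted")
  let has_unknown := face_results.any (fun r => pvStatus r == some "unknown")
  let has_known := face_results.any (fun r => pvStatus r == some "known")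
  if has_blacklisted then "blacklist_alert"
  else if has_unknown then "unknown_alert"
  else if has_known then "known_person"
  else "no_faces"

-- ===== PORT B =====
def detRespLoop (l : List (List (String × String))) (has_unknown has_known : Bool) : String :=
  match l with
  | [] =>
      if has_unknown then "unknown_alert"
      else if has_known then "known_person"
      else "no_faces"
  | r :: rs =>
      let s := pvStatus r
      if s == some "blacklisted" then "blacklist_alert"
      else detRespLoop rs (has_unknown || s == some "unknown")
                          (has_known || (!(s == some "unknown") && s == some "known"))

def determine_response_py_alt (face_results : List (List (String × String))) : String :=
  detRespLoop face_results false false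

-- ===== PRECONDITION & SPEC =====
-- Pre_ excludes inputs with a record lacking a 'status' key: on those Python A's any() scans
-- raise KeyError (except when each scan happens to short-circuit first, an accident of scan reach).
def Pre_determine_response_py (face_results : List (List (String × String))) : Prop :=
  ∀ r ∈ face_results, (pvStatus r).isSome

instance (face_results : List (List (String × String))) : Decidable (Pre_determine_response_py face_results) := by unfold Pre_determine_response_py; infer_instance

def pvWitness_determine_response_py : (List (List (String × String))) :=
  [[("status", "unknown")], [("status", "known")]]

def Spec_determine_response_py (face_results : List (List (String × String))) (out : String) : Prop := out = determine_response_py_alt face_results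
instance (face_results : List (List (String × String))) (out : String) : Decidable (Spec_determine_response_py face_results out) := by unfold Spec_determine_response_py; infer_instance

-- ===== CLAIM (what is proved, stated in full; the proofs are below) =====
def Claim_equal_determine_response_py : Prop := ∀ (face_results : List (List (String × String))), Dom_determine_response_py face_results → Pre_determine_response_py face_results → Spec_determine_response_py face_results (determine_response_py face_results)

-- ===== LEMMAS AND PROOFS =====

-- Loop characterisation: the single pass equals the three-scan if-chain with seed flags.
theorem detRespLoop_eq (l : List (List (String × String))) (hu hk : Bool) :
    detRespLoop l hu hk =
      if l.any (fun r => pvStatus r == some "blacklisted") then "blacklist_alert"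
      else if hu || l.any (fun r => pvStatus r == some "unknown") then "unknown_alert"
      else if hk || l.any (fun r => pvStatus r == some "known") then "known_person"
      else "no_faces" := by
  induction l generalizing hu hk with
  | nil => simp [detRespLoop]
  | cons r rs ih =>
      simp only [detRespLoop, List.any_cons]
      by_cases hb : pvStatus r == some "blacklisted"
      · simp [hb]
      · simp only [hb, Bool.false_or, ih]
        by_cases hu' : pvStatus r == some "unknown"
        · have hk' : ¬ (pvStatus r == some "known") := by
            intro h; exact hb (by simp_all)
          simp [hu']
        · by_cases hk' : pvStatus r == some "known"
          · simp [hu', hk']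
          · simp [hu', hk']

-- ===== VERDICT (by name: the statement is the Claim_ definition above) =====
theorem determine_response_py_spec : Claim_equal_determine_response_py := by
  intro l _ _
  unfold Spec_determine_response_py determine_response_py determine_response_py_alt
  rw [detRespLoop_eq]
  simp
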